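-- pv_equiv track=rewrite | github.com/KisloTAooAnkit/Python-Programs | Contest/Tesasdst.py | solution
-- ===== SOURCE A (Python) =====
-- def solution(n,arr,windowSize):
--     sample = arr[:]
--     sample.sort()
--     starting = n-windowSize
--     mydic = dict()
--     for i in range(starting,n):
--         if sample[i] not in mydic:
--             mydic[sample[i]] = 1
--         else:
--             mydic[sample[i]] += 1
--     res = []
--     for i in range(0,n):
--         if arr[i] in mydic and mydic[arr[i]] > 0:
--             res.append(arr[i])
--             mydic[arr[i]] -=1
--
--     return res
-- ===== SOURCE B (Python) =====
-- def solution(n, arr, windowSize):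
--     if n <= 0 or windowSize <= 0:
--         return []
--     window = sorted(arr)[n - windowSize : n]
--     lo = window[0]
--     hi = window[-1]
--     need_lo = window.count(lo)
--     need_hi = window.count(hi)
--     res = []
--     for x in arr[:n]:
--         if lo < x < hi:
--             res.append(x)
--         elif x == lo:
--             if need_lo > 0:
--                 res.append(x)
--                 need_lo -= 1
--         elif x == hi:
--             if need_hi > 0:
--                 res.append(x)
--                 need_hi -= 1
--     return res
-- ===== Notes on version B (the rewrite author's own statement) =====
-- stated objective: alternative
-- what changed: A builds a dict counting every value of the sorted window and filters by dict lookups with per-value decrements; B never builds a dict: it takes the window's two boundary values and their two counts, and keeps elements by a three-way integer comparison with two scalar budgets. Pre_ excludes inputs with n > len(arr) or windowSize > n, where A raises IndexError or returns a value produced by Python's negative-index wraparound into the sorted array.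
-- outside the precondition, e.g. on solution(1, [2, 1], 2): A returns [2], B raises IndexError
import Mathlib
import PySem

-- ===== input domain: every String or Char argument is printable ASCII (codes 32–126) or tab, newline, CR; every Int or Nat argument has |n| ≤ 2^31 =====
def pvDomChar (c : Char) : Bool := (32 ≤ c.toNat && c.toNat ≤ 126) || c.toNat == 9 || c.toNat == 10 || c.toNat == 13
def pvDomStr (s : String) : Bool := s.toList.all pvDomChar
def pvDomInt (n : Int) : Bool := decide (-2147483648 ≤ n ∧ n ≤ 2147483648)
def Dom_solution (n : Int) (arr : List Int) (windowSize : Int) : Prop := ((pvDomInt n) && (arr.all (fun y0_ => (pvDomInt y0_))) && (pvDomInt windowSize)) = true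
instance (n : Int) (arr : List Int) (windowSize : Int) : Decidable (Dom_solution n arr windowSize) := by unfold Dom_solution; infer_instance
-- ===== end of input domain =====

-- B replaces A's counted-window dict by the window's two boundary values with their counts and a
-- three-way comparison scan (alternative algorithm, no dict at all). Return values only; neither
-- program mutates its arguments (A sorts a copy).

-- ===== PORT A =====
-- body of A's first loop, on the element sample[i]: if sample[i] not in mydic: =1 else: +=1
def solCnt (d : PySem.Dict Int Int) (v : Int) : PySem.Dict Int Int :=
  if d.contains v = false then d.insert v 1 else d.modify v 0 (· + 1)

-- body of A's second loop, on the element arr[i]: if arr[i] in mydic and mydic[arr[i]] > 0: append; -= 1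
def solStep (p : List Int × PySem.Dict Int Int) (x : Int) : List Int × PySem.Dict Int Int :=
  match p.2.get? x with
  | some c => if c > 0 then (p.1 ++ [x], p.2.modify x 0 (· - 1)) else p
  | none => p

def solution (n : Int) (arr : List Int) (windowSize : Int) : List Int :=
  -- sample = arr[:]; sample.sort()
  let sample := PySem.List.sorted arr (fun x => x) false
  let starting := n - windowSize
  -- for i in range(starting, n): …  (pyGetD is exact under Pre_: every index in range)
  let mydic : PySem.Dict Int Int :=
    (PySem.List.pyRange starting n 1).foldl
      (fun d i => solCnt d (PySem.List.pyGetD sample i 0)) PySem.Dict.empty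
  -- for i in range(0, n): …
  ((PySem.List.pyRange 0 n 1).foldl
      (fun p i => solStep p (PySem.List.pyGetD arr i 0)) ([], mydic)).1

-- ===== PORT B =====
-- body of B's scan loop: three-way comparison with the two budgets
def altKeep (lo hi : Int) (p : List Int × Int × Int) (x : Int) : List Int × Int × Int :=
  if lo < x ∧ x < hi then (p.1 ++ [x], p.2)
  else if x = lo then
    (if p.2.1 > 0 then (p.1 ++ [x], p.2.1 - 1, p.2.2) else p)
  else if x = hi then
    (if p.2.2 > 0 then (p.1 ++ [x], p.2.1, p.2.2 - 1) else p)
  else p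

def solution_alt (n : Int) (arr : List Int) (windowSize : Int) : List Int :=
  if n ≤ 0 ∨ windowSize ≤ 0 then []
  else
    -- window = sorted(arr)[n - windowSize : n]
    let window := PySem.List.slice (PySem.List.sorted arr (fun x => x) false)
                    (some (n - windowSize)) (some n)
    let lo := PySem.List.pyGetD window 0 0        -- window[0]   (in range under Pre_)
    let hi := PySem.List.pyGetD window (-1) 0     -- window[-1]  (in range under Pre_)
    let needLo : Int := (PySem.List.count window lo : Int)
    let needHi : Int := (PySem.List.count window hi : Int)
    ((PySem.List.slice arr none (some n)).foldl (altKeep lo hi) ([], needLo, needHi)).1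

-- ===== PRECONDITION & SPEC =====
-- Pre_ is the natural domain: n is at most the actual length and the window does not overrun the
-- prefix (plus the degenerate n ≤ 0 region on which A returns []). Excluded inputs with
-- n > len(arr) or windowSize > n are malformed for this task: there A either raises an IndexError
-- or returns a value produced by Python's negative-index wraparound into the sorted array.
def Pre_solution (n : Int) (arr : List Int) (windowSize : Int) : Prop :=
  (0 ≤ n ∧ n ≤ (arr.length : Int) ∧ windowSize ≤ n) ∨
  (n ≤ 0 ∧ (windowSize ≤ 0 ∨ windowSize ≤ n + (arr.length : Int)))
instance (n : Int) (arr : List Int) (windowSize : Int) : Decidable (Pre_solution n arr windowSize) := by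
  unfold Pre_solution; infer_instance

def pvWitness_solution : Int × List Int × Int := (3, [1, 2, 2], 2)

def Spec_solution (n : Int) (arr : List Int) (windowSize : Int) (out : List Int) : Prop := out = solution_alt n arr windowSize
instance (n : Int) (arr : List Int) (windowSize : Int) (out : List Int) : Decidable (Spec_solution n arr windowSize out) := by unfold Spec_solution; infer_instance

-- ===== CLAIM (what is proved, stated in full; the proofs are below) =====
def Claim_equal_solution : Prop := ∀ (n : Int) (arr : List Int) (windowSize : Int), Dom_solution n arr windowSize → Pre_solution n arr windowSize → Spec_solution n arr windowSize (solution n arr windowSize)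

-- ===== LEMMAS AND PROOFS =====

-- A's counting body is exactly Counter's update
lemma solCnt_eq_modify (d : PySem.Dict Int Int) (v : Int) : solCnt d v = d.modify v 0 (· + 1) := by
  unfold solCnt
  by_cases h : d.contains v = false
  · simp only [h, PySem.Dict.modify]
    rw [PySem.Dict.getD_of_not_contains d 0 h]
    simp
  · simp [h]

-- a for-loop over range(a, b) reading xs[i] is a fold over the slice xs[a:b]  (0 ≤ a ≤ b ≤ len xs)
lemma pvFoldRange {β : Type} (xs : List Int) (dflt : Int) (f : β → Int → β) :
    ∀ (c : Nat) (a : Int) (init : β), 0 ≤ a → a + c ≤ (xs.length : Int) →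
    (PySem.List.pyRange a (a + (c : Int)) 1).foldl
        (fun acc j => f acc (PySem.List.pyGetD xs j dflt)) init
      = ((xs.drop a.toNat).take c).foldl f init := by
  intro c
  induction c with
  | zero =>
    intro a init _ _
    rw [PySem.List.pyRange_one_eq_nil (by omega : a + ((0:Nat):Int) ≤ a)]
    simp
  | succ c ih =>
    intro a init ha hlen
    have hal : a.toNat < xs.length := by omega
    have hcons : PySem.List.pyRange a (a + ((c+1 : Nat) : Int)) 1
        = a :: PySem.List.pyRange (a+1) ((a+1) + (c : Int)) 1 := by
      rw [PySem.List.pyRange_one_cons (by push_cast; omega)]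
      congr 1
      congr 1
      push_cast; ring
    rw [hcons]
    simp only [List.foldl_cons]
    rw [ih (a+1) _ (by omega) (by push_cast at hlen ⊢; omega)]
    have hget : PySem.List.pyGetD xs a dflt = xs[a.toNat] :=
      PySem.List.pyGetD_eq_getElem xs dflt ha (by omega)
    rw [hget]
    have hdrop : xs.drop a.toNat = xs[a.toNat] :: xs.drop (a.toNat + 1) :=
      List.drop_eq_getElem_cons hal
    have htn : (a+1).toNat = a.toNat + 1 := by omega
    rw [hdrop, htn, List.take_succ_cons, List.foldl_cons]

lemma pvFoldRange' {β : Type} (xs : List Int) (dflt : Int) (f : β → Int → β)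
    (a b : Int) (init : β) (h0 : 0 ≤ a) (hab : a ≤ b) (hb : b ≤ (xs.length : Int)) :
    (PySem.List.pyRange a b 1).foldl (fun acc j => f acc (PySem.List.pyGetD xs j dflt)) init
      = ((xs.drop a.toNat).take (b - a).toNat).foldl f init := by
  have hb' : b = a + (((b - a).toNat : Nat) : Int) := by omega
  conv_lhs => rw [hb']
  exact pvFoldRange xs dflt f (b - a).toNat a init h0 (by omega)

-- A's second loop keeps nothing when the dict is empty
lemma pvLoopEmpty : ∀ (xs res : List Int),
    xs.foldl solStep (res, (PySem.Dict.empty : PySem.Dict Int Int)) = (res, PySem.Dict.empty) := by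
  intro xs
  induction xs with
  | nil => intro res; rfl
  | cons x t ih =>
    intro res
    simp only [List.foldl_cons, solStep, PySem.Dict.get?_empty]
    exact ih res

-- sorted prefixes are below sorted suffixes
lemma pvCross (s : List Int) (hp : s.Pairwise (· ≤ ·)) (j : Nat) :
    ∀ x ∈ s.take j, ∀ y ∈ s.drop j, x ≤ y := by
  have h := hp
  rw [← List.take_append_drop j s] at h
  exact (List.pairwise_append.mp h).2.2

lemma pvLeAll (s : List Int) (hp : s.Pairwise (· ≤ ·)) (i : Nat) (hi : i < s.length) :
    ∀ y ∈ s.drop i, s[i] ≤ y := by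
  intro y hy
  rw [List.drop_eq_getElem_cons hi] at hy
  rcases List.mem_cons.mp hy with h | h
  · omega
  · have hd : (s.drop (i+1)).Pairwise (· ≤ ·) := hp.drop
    have := pvCross s hp (i+1) s[i] ?_ y (by simpa using h)
    · exact this
    · have : i < (s.take (i+1)).length := by simp; omega
      have hg : (s.take (i+1))[i] = s[i] := List.getElem_take ..
      rw [← hg]; exact List.getElem_mem _
lemma pvAllLe (s : List Int) (hp : s.Pairwise (· ≤ ·)) (i : Nat) (hi : i < s.length) :
    ∀ y ∈ s.take (i+1), y ≤ s[i] := by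
  intro y hy
  obtain ⟨j, hj, rfl⟩ := List.getElem_of_mem hy
  have hj' : j < i + 1 := by simp at hj; omega
  have hg : (s.take (i+1))[j] = s[j]'(by simp at hj; omega) := List.getElem_take ..
  rw [hg]
  rcases Nat.lt_or_ge j i with h | h
  · exact List.pairwise_iff_getElem.mp hp j i (by omega) hi h
  · have : j = i := by omega
    subst this; rfl

-- the bridge: A's decrementing-dict scan = B's two-budget scan
lemma pvBridge (tlo thi : Int) (hle : tlo ≤ thi) (C : Int → Int) :
    ∀ (xs pre res : List Int) (d : PySem.Dict Int Int) (blo bhi : Int),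
    (∀ v, tlo < v → v < thi → d.getD v 0 = C v - (pre.count v : Int)) →
    d.getD tlo 0 = blo →
    (tlo < thi → d.getD thi 0 = bhi) →
    (∀ v, v < tlo ∨ thi < v → d.getD v 0 = 0) →
    (∀ v, tlo < v → v < thi → (pre.count v : Int) + (xs.count v : Int) ≤ C v) →
    (xs.foldl solStep (res, d)).1 = (xs.foldl (altKeep tlo thi) (res, blo, bhi)).1 := by
  intro xs
  induction xs with
  | nil => intro pre res d blo bhi _ _ _ _ _; rfl
  | cons x t ih =>
    intro pre res d blo bhi Hmid Hlo Hhi Hout Hcnt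
    simp only [List.foldl_cons]
    have hgd : d.getD x 0 = (d.get? x).getD 0 := PySem.Dict.getD_eq_get?_getD ..
    have hcount : ∀ v : Int, v ≠ x → ((pre ++ [x]).count v) = pre.count v := by
      intro v hv
      simp [List.count_append, (Ne.symm hv)]
    have hcx : ((pre ++ [x]).count x) = pre.count x + 1 := by
      simp [List.count_append]
    have hcntt : ∀ v : Int, v ≠ x → t.count v = (x :: t).count v := by
      intro v hv; simp [(Ne.symm hv)]
    by_cases hxlo : x = tlo
    · subst hxlo
      have hB : altKeep x thi (res, blo, bhi) x
          = if blo > 0 then (res ++ [x], blo - 1, bhi) else (res, blo, bhi) := by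
        simp [altKeep]
      by_cases hb : blo > 0
      · have hsome : d.get? x = some blo := by
          cases hg : d.get? x with
          | none => rw [hg] at hgd; simp at hgd; omega
          | some c => rw [hg] at hgd; simp at hgd; rw [hgd] at Hlo; rw [Hlo]
        have hA : solStep (res, d) x = (res ++ [x], d.modify x 0 (· - 1)) := by
          simp [solStep, hsome, hb]
        rw [hA, hB, if_pos hb]
        apply ih (pre ++ [x])
        · intro v hv1 hv2
          have hvx : v ≠ x := by omega
          rw [PySem.Dict.getD_modify, if_neg hvx, hcount v hvx]
          exact Hmid v hv1 hv2
        · rw [PySem.Dict.getD_modify, if_pos rfl, Hlo]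
        · intro hlt
          have : thi ≠ x := by omega
          rw [PySem.Dict.getD_modify, if_neg this]
          exact Hhi hlt
        · intro v hv
          have hvx : v ≠ x := by omega
          rw [PySem.Dict.getD_modify, if_neg hvx]
          exact Hout v hv
        · intro v hv1 hv2
          have hvx : v ≠ x := by omega
          rw [hcount v hvx, hcntt v hvx]
          exact Hcnt v hv1 hv2
      · have hA : solStep (res, d) x = (res, d) := by
          cases hg : d.get? x with
          | none => simp [solStep, hg]
          | some c =>
            rw [hg] at hgd; simp at hgd; rw [hgd] at Hlo
            simp [solStep, hg]
            omega
        rw [hA, hB, if_neg hb]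
        apply ih (pre ++ [x])
        · intro v hv1 hv2
          have hvx : v ≠ x := by omega
          rw [hcount v hvx]; exact Hmid v hv1 hv2
        · exact Hlo
        · exact Hhi
        · exact Hout
        · intro v hv1 hv2
          have hvx : v ≠ x := by omega
          rw [hcount v hvx, hcntt v hvx]
          exact Hcnt v hv1 hv2
    · by_cases hxhi : x = thi
      · subst hxhi
        have hth : tlo < x := lt_of_le_of_ne hle (Ne.symm hxlo)
        have hB : altKeep tlo x (res, blo, bhi) x
            = if bhi > 0 then (res ++ [x], blo, bhi - 1) else (res, blo, bhi) := by
          simp [altKeep, hxlo]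
        have Hhix := Hhi hth
        by_cases hb : bhi > 0
        · have hsome : d.get? x = some bhi := by
            cases hg : d.get? x with
            | none => rw [hg] at hgd; simp at hgd; omega
            | some c => rw [hg] at hgd; simp at hgd; rw [hgd] at Hhix; rw [Hhix]
          have hA : solStep (res, d) x = (res ++ [x], d.modify x 0 (· - 1)) := by
            simp [solStep, hsome, hb]
          rw [hA, hB, if_pos hb]
          apply ih (pre ++ [x])
          · intro v hv1 hv2
            have hvx : v ≠ x := by omega
            rw [PySem.Dict.getD_modify, if_neg hvx, hcount v hvx]
            exact Hmid v hv1 hv2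
          · have : tlo ≠ x := by omega
            rw [PySem.Dict.getD_modify, if_neg this]
            exact Hlo
          · intro _
            rw [PySem.Dict.getD_modify, if_pos rfl, Hhix]
          · intro v hv
            have hvx : v ≠ x := by omega
            rw [PySem.Dict.getD_modify, if_neg hvx]
            exact Hout v hv
          · intro v hv1 hv2
            have hvx : v ≠ x := by omega
            rw [hcount v hvx, hcntt v hvx]
            exact Hcnt v hv1 hv2
        · have hA : solStep (res, d) x = (res, d) := by
            cases hg : d.get? x with
            | none => simp [solStep, hg]
            | some c =>
              rw [hg] at hgd; simp at hgd; rw [hgd] at Hhix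
              simp [solStep, hg]
              omega
          rw [hA, hB, if_neg hb]
          apply ih (pre ++ [x])
          · intro v hv1 hv2
            have hvx : v ≠ x := by omega
            rw [hcount v hvx]; exact Hmid v hv1 hv2
          · exact Hlo
          · exact Hhi
          · exact Hout
          · intro v hv1 hv2
            have hvx : v ≠ x := by omega
            rw [hcount v hvx, hcntt v hvx]
            exact Hcnt v hv1 hv2
      · rcases lt_trichotomy x tlo with hx | hx | hx
        · -- x below the window: both sides skip
          have h0 : d.getD x 0 = 0 := Hout x (Or.inl hx)
          have hA : solStep (res, d) x = (res, d) := by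
            cases hg : d.get? x with
            | none => simp [solStep, hg]
            | some c =>
              rw [hg] at hgd; simp at hgd
              simp [solStep, hg]
              omega
          have hB : altKeep tlo thi (res, blo, bhi) x = (res, blo, bhi) := by
            simp [altKeep, hxlo, hxhi]
            omega
          rw [hA, hB]
          apply ih (pre ++ [x])
          · intro v hv1 hv2
            have hvx : v ≠ x := by omega
            rw [hcount v hvx]; exact Hmid v hv1 hv2
          · exact Hlo
          · exact Hhi
          · exact Hout
          · intro v hv1 hv2
            have hvx : v ≠ x := by omega
            rw [hcount v hvx, hcntt v hvx]
            exact Hcnt v hv1 hv2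
        · exact absurd hx hxlo
        · rcases lt_trichotomy x thi with hy | hy | hy
          · -- inside the window strictly: both sides keep
            have hmx := Hmid x hx hy
            have hcntx := Hcnt x hx hy
            have hxt : ((x :: t).count x : Int) = (t.count x : Int) + 1 := by
              simp
            have hpos : 1 ≤ d.getD x 0 := by
              rw [hmx]; omega
            have hsome : d.get? x = some (d.getD x 0) := by
              cases hg : d.get? x with
              | none => rw [hg] at hgd; simp at hgd; omega
              | some c => rw [hg] at hgd; simp at hgd; rw [hgd]
            have hA : solStep (res, d) x = (res ++ [x], d.modify x 0 (· - 1)) := by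
              simp [solStep, hsome]
              omega
            have hB : altKeep tlo thi (res, blo, bhi) x = (res ++ [x], blo, bhi) := by
              simp [altKeep, hx, hy]
            rw [hA, hB]
            apply ih (pre ++ [x])
            · intro v hv1 hv2
              by_cases hvx : v = x
              · subst hvx
                rw [PySem.Dict.getD_modify, if_pos rfl, hmx, hcx]
                push_cast
                ring
              · rw [PySem.Dict.getD_modify, if_neg hvx, hcount v hvx]
                exact Hmid v hv1 hv2
            · have : tlo ≠ x := by omega
              rw [PySem.Dict.getD_modify, if_neg this]
              exact Hlo
            · intro hlt
              have : thi ≠ x := by omega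
              rw [PySem.Dict.getD_modify, if_neg this]
              exact Hhi hlt
            · intro v hv
              have hvx : v ≠ x := by omega
              rw [PySem.Dict.getD_modify, if_neg hvx]
              exact Hout v hv
            · intro v hv1 hv2
              by_cases hvx : v = x
              · subst hvx
                rw [hcx]
                push_cast
                push_cast at hxt hcntx
                omega
              · rw [hcount v hvx, hcntt v hvx]
                exact Hcnt v hv1 hv2
          · exact absurd hy hxhi
          · -- above the window: both sides skip
            have h0 : d.getD x 0 = 0 := Hout x (Or.inr hy)
            have hA : solStep (res, d) x = (res, d) := by
              cases hg : d.get? x with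
              | none => simp [solStep, hg]
              | some c =>
                rw [hg] at hgd; simp at hgd
                simp [solStep, hg]
                omega
            have hB : altKeep tlo thi (res, blo, bhi) x = (res, blo, bhi) := by
              simp [altKeep, hxlo, hxhi]
              omega
            rw [hA, hB]
            apply ih (pre ++ [x])
            · intro v hv1 hv2
              have hvx : v ≠ x := by omega
              rw [hcount v hvx]; exact Hmid v hv1 hv2
            · exact Hlo
            · exact Hhi
            · exact Hout
            · intro v hv1 hv2
              have hvx : v ≠ x := by omega
              rw [hcount v hvx, hcntt v hvx]
              exact Hcnt v hv1 hv2

-- window facts and final assembly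
theorem solution_spec : Claim_equal_solution := by
  unfold Claim_equal_solution
  intro n arr k _ hpre
  unfold Spec_solution
  by_cases hn : n ≤ 0
  · -- n ≤ 0: A's second loop is over an empty range, B takes its first branch
    simp only [solution, solution_alt]
    rw [if_pos (Or.inl hn), PySem.List.pyRange_one_eq_nil hn, List.foldl_nil]
  · have hpre' : 0 ≤ n ∧ n ≤ (arr.length : Int) ∧ k ≤ n := by
      rcases hpre with h | h
      · exact h
      · omega
    obtain ⟨hn0, hnL, hkn⟩ := hpre'
    by_cases hk : k ≤ 0
    · -- windowSize ≤ 0: A's dict stays empty, the scan keeps nothing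
      simp only [solution, solution_alt]
      rw [if_pos (Or.inr hk), PySem.List.pyRange_one_eq_nil (by omega : n ≤ n - k),
        List.foldl_nil,
        pvFoldRange' arr 0 solStep 0 n ([], PySem.Dict.empty) le_rfl (by omega) hnL,
        pvLoopEmpty]
    · -- main case: 0 < windowSize ≤ n ≤ len arr
      have hk0 : 0 < k := by omega
      simp only [solution, solution_alt]
      rw [if_neg (by omega : ¬(n ≤ 0 ∨ k ≤ 0))]
      set s := PySem.List.sorted arr (fun x => x) false with hs
      have hslen : s.length = arr.length := PySem.List.length_sorted ..
      have hperm : s.Perm arr := PySem.List.sorted_perm ..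
      have hpair : s.Pairwise (· ≤ ·) := by
        have := PySem.List.sorted_pairwise arr (fun x => x)
        simpa using this
      -- Nat bookkeeping
      have hm'lt : (n - k).toNat < s.length := by rw [hslen]; omega
      have hn1lt : (n - 1).toNat < s.length := by rw [hslen]; omega
      -- A's first loop is the Counter of the window w = s[n-k : n]
      rw [pvFoldRange' s 0 solCnt (n - k) n PySem.Dict.empty (by omega) (by omega)
            (by rw [hslen]; exact hnL)]
      set w := (s.drop (n - k).toNat).take (n - (n - k)).toNat with hw
      have hwcnt : List.foldl solCnt PySem.Dict.empty w = PySem.Dict.counter w := by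
        rw [PySem.Dict.counter_eq_foldl]
        exact PySem.List.foldl_congr_mem w solCnt _ _ (fun acc x _ => solCnt_eq_modify acc x)
      rw [hwcnt]
      -- A's second loop runs over arr[0:n]
      rw [pvFoldRange' arr 0 solStep 0 n ([], PySem.Dict.counter w) le_rfl (by omega) hnL]
      -- B's window slice is the same list w
      have hsL : (s.length : Int) = (arr.length : Int) := by exact_mod_cast hslen
      have hgc : ∀ (i j : Nat) (hi : i < s.length) (hj : j < s.length), i = j → s[i]'hi = s[j]'hj := by
        intro i j hi hj h
        subst h
        rfl
      have hwin : PySem.List.slice s (some (n - k)) (some n) = w := by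
        rw [PySem.List.slice_of_nonneg s (by omega) (by omega) (by omega) (by omega)]
        rw [hw]
        congr 1
        omega
      rw [hwin, PySem.List.slice_to arr (by omega : (0:Int) ≤ n)]
      simp only [Int.toNat_zero, List.drop_zero, Int.sub_zero]
      have hwlen : w.length = k.toNat := by
        rw [hw]
        simp [List.length_take, List.length_drop, hslen]
        omega
      -- the two boundary reads
      have hlo : PySem.List.pyGetD w 0 0 = s[(n - k).toNat] := by
        rw [PySem.List.pyGetD_eq_getElem w 0 le_rfl (by rw [hwlen]; exact_mod_cast (by omega : (0:Int) < (k.toNat : Int)))]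
        simp only [hw, Int.toNat_zero, List.getElem_take, List.getElem_drop]
        exact hgc _ _ _ _ (by omega)
      have hwne : w ≠ [] := by
        intro h
        rw [h] at hwlen
        simp at hwlen
        omega
      have hhi : PySem.List.pyGetD w (-1) 0 = s[(n - 1).toNat] := by
        rw [PySem.List.pyGetD_neg_one w 0 hwne, List.getLast_eq_getElem]
        simp only [hw, List.length_take, List.length_drop, List.getElem_take, List.getElem_drop]
        exact hgc _ _ _ _ (by omega)
      rw [hlo, hhi]
      set tlo := s[(n - k).toNat] with htlo
      set thi := s[(n - 1).toNat] with hthi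
      -- order facts about the three blocks of s
      have hmem_tlo : tlo ∈ s.drop (n - k).toNat := by
        rw [List.drop_eq_getElem_cons hm'lt]
        exact List.mem_cons_self ..
      have hdropsucc : s.drop ((n - 1).toNat + 1) = s.drop n.toNat := by
        congr 1
        omega
      have P1 : ∀ y ∈ w, tlo ≤ y := fun y hy =>
        pvLeAll s hpair (n - k).toNat hm'lt y (List.take_subset _ _ hy)
      have hn'take : s.take n.toNat = s.take (n - k).toNat ++ w := by
        rw [hw, ← List.take_add]
        congr 1
        omega
      have P2 : ∀ y ∈ w, y ≤ thi := by
        intro y hy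
        have : y ∈ s.take ((n - 1).toNat + 1) := by
          have h1 : (n - 1).toNat + 1 = n.toNat := by omega
          rw [h1, hn'take]
          exact List.mem_append_right _ hy
        exact pvAllLe s hpair (n - 1).toNat hn1lt y this
      have P3 : ∀ x ∈ s.take (n - k).toNat, x ≤ tlo := fun x hx =>
        pvCross s hpair (n - k).toNat x hx tlo hmem_tlo
      have P4 : ∀ y ∈ s.drop n.toNat, thi ≤ y := by
        intro y hy
        apply pvLeAll s hpair (n - 1).toNat hn1lt
        rw [List.drop_eq_getElem_cons hn1lt, hdropsucc]
        exact List.mem_cons_of_mem _ hy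
      have hle : tlo ≤ thi := by
        rcases Nat.lt_or_ge (n - k).toNat (n - 1).toNat with h | h
        · exact List.pairwise_iff_getElem.mp hpair _ _ (by omega) hn1lt h
        · have heq : tlo = thi := by
            rw [htlo, hthi]
            congr 1
            omega
          exact le_of_eq heq
      -- counts of values outside [tlo, thi] in s split off the window
      have hsplit : ∀ v : Int, s.count v
          = (s.take (n - k).toNat).count v + w.count v + (s.drop n.toNat).count v := by
        intro v
        conv_lhs => rw [← List.take_append_drop n.toNat s, hn'take]
        simp [List.count_append]
        omega
      -- apply the bridge with B's two literal window counts as the budgets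
      apply pvBridge tlo thi hle (fun v => ((arr.count v : Nat) : Int)) _ []
      · -- Hmid: strictly inside the window every occurrence of v is in the window
        intro v hv1 hv2
        rw [PySem.Dict.getD_counter]
        have h1 : (s.take (n - k).toNat).count v = 0 := by
          rw [List.count_eq_zero]
          intro hmem
          have := P3 v hmem
          omega
        have h2 : (s.drop n.toNat).count v = 0 := by
          rw [List.count_eq_zero]
          intro hmem
          have := P4 v hmem
          omega
        have h3 := hsplit v
        have h4 := hperm.count_eq v
        simp only [List.count_nil]
        push_cast
        omega
      · -- Hlo: the dict's count of tlo is B's literal window count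
        rw [PySem.Dict.getD_counter, PySem.List.count_eq]
      · -- Hhi: the dict's count of thi is B's literal window count
        intro _
        rw [PySem.Dict.getD_counter, PySem.List.count_eq]
      · -- Hout: values outside [tlo, thi] do not occur in the window
        intro v hv
        rw [PySem.Dict.getD_counter]
        have : w.count v = 0 := by
          rw [List.count_eq_zero]
          intro hmem
          rcases hv with h | h
          · have := P1 v hmem
            omega
          · have := P2 v hmem
            omega
        rw [this]
        rfl
      · -- Hcnt: occurrences in arr[:n] are at most occurrences in arr
        intro v _ _
        simp only [List.count_nil, Nat.cast_zero, zero_add]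
        exact_mod_cast List.Sublist.count_le v (List.take_sublist ..)
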